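-- pv_equiv track=rewrite | github.com/nwrim/continuous_recognition_task_jsPsych | scripts/03_calculate_metrics.py | update_crt_image_level_results
-- ===== SOURCE A (Python) =====
-- def update_crt_image_level_results(image_level_results, imseq, imtypeseq, keypressseq):
--     """
--     Update image-level memory performance counts based on participant trial data.
--
--     Parameters
--     ----------
--     image_level_results : dict
--         Dictionary mapping image names to result counters.
--     imseq : array-like
--         Sequence of image filenames.
--     imtypeseq : array-like
--         Trial types corresponding to each image (e.g., TARGET, REPEAT).
--     keypressseq : array-like
--         Boolean array indicating whether a keypress was made on each trial.
--
--     Returns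
--     -------
--     dict
--         Updated image-level results.
--     """
--
--     # looping through the trials
--     for im, imtype, keypress in zip(imseq, imtypeseq, keypressseq):
--         if imtype == 'TARGET':
--             # increase the number of participants who saw this image as target
--             image_level_results[im]['n_participants_target'] += 1
--             # if they saw it for the first time and pressed, it is a false alarm
--             if keypress:
--                 image_level_results[im]['target_fa'] += 1
--             # if they saw it for the first time and didn't press, it is a correct rejection
--             else:
--                 image_level_results[im]['target_cr'] += 1
--         elif imtype == 'REPEAT':
--             # if they saw it for the second time and pressed, it is a hit
--             if keypress:
--                 image_level_results[im]['target_hit'] += 1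
--             # if they saw it for the second time and didn't press, it is a miss
--             else:
--                 image_level_results[im]['target_miss'] += 1
--         elif imtype == 'FILLER':
--             # increase the number of participants who saw this image as filler
--             image_level_results[im]['n_participants_filler'] += 1
--             # if they saw it for the first time and pressed, it is a false alarm
--             if keypress:
--                 image_level_results[im]['filler_fa'] += 1
--             # if they saw it for the first time and didn't press, it is a correct rejection
--             else:
--                 image_level_results[im]['filler_cr'] += 1
--         elif imtype == 'VIGILANCE':
--             # if they saw it for the second time and pressed, it is a hit
--             if keypress:
--                 image_level_results[im]['filler_hit'] += 1
--             # if they saw it for the second time and didn't press, it is a miss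
--             else:
--                 image_level_results[im]['filler_miss'] += 1
--         else:
--             raise ValueError('Unknown trial type')
--     return image_level_results
-- ===== SOURCE B (Python) =====
-- # Two-phase re-implementation: a table-driven pass aggregates all increments
-- # into a delta Counter keyed by (image, counter-name), then a second pass
-- # applies each aggregated delta once. Mutates image_level_results in place
-- # (like the original); equivalence is about the returned value.
--
-- TYPE_TABLE = {
--     'TARGET': ('n_participants_target', 'target_fa', 'target_cr'),
--     'REPEAT': (None, 'target_hit', 'target_miss'),
--     'FILLER': ('n_participants_filler', 'filler_fa', 'filler_cr'),
--     'VIGILANCE': (None, 'filler_hit', 'filler_miss'),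
-- }
--
--
-- def update_crt_image_level_results(image_level_results, imseq, imtypeseq, keypressseq):
--     delta = {}
--     for im, imtype, keypress in zip(imseq, imtypeseq, keypressseq):
--         if imtype not in TYPE_TABLE:
--             raise ValueError('Unknown trial type')
--         part_key, press_key, nopress_key = TYPE_TABLE[imtype]
--         if part_key is not None:
--             delta[im, part_key] = delta.get((im, part_key), 0) + 1
--         key = press_key if keypress else nopress_key
--         delta[im, key] = delta.get((im, key), 0) + 1
--     for (im, key), count in delta.items():
--         image_level_results[im][key] += count
--     return image_level_results
-- ===== Notes on version B (the rewrite author's own statement) =====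
-- stated objective: alternative
-- what changed: Replaces the per-trial if/elif cascade that mutates the nested dict on every trial with a table-driven first pass that aggregates all increments into a Counter-style delta dict keyed by (image, counter-name), followed by a single apply pass over the aggregated deltas.
import Mathlib
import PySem

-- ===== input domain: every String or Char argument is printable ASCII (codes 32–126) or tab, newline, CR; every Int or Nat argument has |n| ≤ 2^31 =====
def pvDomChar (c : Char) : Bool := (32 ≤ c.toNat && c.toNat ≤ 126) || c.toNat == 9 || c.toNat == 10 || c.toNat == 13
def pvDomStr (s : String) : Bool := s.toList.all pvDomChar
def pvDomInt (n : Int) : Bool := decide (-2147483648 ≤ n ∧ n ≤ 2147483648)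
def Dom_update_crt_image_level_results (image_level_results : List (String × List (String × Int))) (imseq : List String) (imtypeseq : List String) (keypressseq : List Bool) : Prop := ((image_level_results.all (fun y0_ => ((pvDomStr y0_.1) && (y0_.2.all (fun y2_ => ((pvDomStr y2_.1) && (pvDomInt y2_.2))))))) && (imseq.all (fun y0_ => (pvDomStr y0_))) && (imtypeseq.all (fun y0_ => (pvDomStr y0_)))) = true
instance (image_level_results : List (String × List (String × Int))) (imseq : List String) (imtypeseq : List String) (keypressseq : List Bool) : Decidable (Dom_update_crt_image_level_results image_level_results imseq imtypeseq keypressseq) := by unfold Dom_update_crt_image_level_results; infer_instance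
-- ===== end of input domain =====

-- B replaces A's per-trial if/elif cascade (mutating the nested dict on every trial)
-- by a table-driven pass that aggregates increments into a delta Counter keyed by
-- (image, counter-name) and then applies each aggregated delta once; same cost, the
-- equivalence proved here is about the RETURN value (both Pythons mutate the dict in place).

-- `inner[key] += c` on a Python dict rendered as an association list: bump the value of
-- the FIRST entry with that key; a missing key is a Python KeyError (excluded by Pre_),
-- rendered here as a no-op.
def pyIncInner (inner : List (String × Int)) (key : String) (c : Int) : List (String × Int) :=
  match inner with
  | [] => []
  | (k, v) :: rest =>
    if k = key then (k, v + c) :: rest else (k, v) :: pyIncInner rest key c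

-- `d[im][key] += c` on the outer association list (first matching image entry).
def pyInc (d : List (String × List (String × Int))) (im : String) (key : String) (c : Int) :
    List (String × List (String × Int)) :=
  match d with
  | [] => []
  | (i, inner) :: rest =>
    if i = im then (i, pyIncInner inner key c) :: rest else (i, inner) :: pyInc rest im key c

-- ===== PORT A =====
-- Literal transliteration of A: one loop over zip(imseq, imtypeseq, keypressseq) with the
-- if/elif cascade; the `raise ValueError` branch (excluded by Pre_) is rendered as a no-op.
def update_crt_image_level_results (image_level_results : List (String × List (String × Int))) (imseq : List String) (imtypeseq : List String) (keypressseq : List Bool) : List (String × List (String × Int)) :=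
  (imseq.zip (imtypeseq.zip keypressseq)).foldl
    (fun d t =>
      let im := t.1; let imtype := t.2.1; let keypress := t.2.2
      if imtype = "TARGET" then
        let d := pyInc d im "n_participants_target" 1
        if keypress then pyInc d im "target_fa" 1 else pyInc d im "target_cr" 1
      else if imtype = "REPEAT" then
        if keypress then pyInc d im "target_hit" 1 else pyInc d im "target_miss" 1
      else if imtype = "FILLER" then
        let d := pyInc d im "n_participants_filler" 1
        if keypress then pyInc d im "filler_fa" 1 else pyInc d im "filler_cr" 1
      else if imtype = "VIGILANCE" then
        if keypress then pyInc d im "filler_hit" 1 else pyInc d im "filler_miss" 1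
      else d)  -- Python: raise ValueError (outside Pre_)
    image_level_results

-- ===== PORT B =====
-- TYPE_TABLE from Source B.
def typeTable : PySem.Dict String (Option String × String × String) :=
  PySem.Dict.ofList
    [("TARGET", (some "n_participants_target", "target_fa", "target_cr")),
     ("REPEAT", (none, "target_hit", "target_miss")),
     ("FILLER", (some "n_participants_filler", "filler_fa", "filler_cr")),
     ("VIGILANCE", (none, "filler_hit", "filler_miss"))]

-- Transliteration of Source B: build the delta dict, then apply it.
def update_crt_image_level_results_alt (image_level_results : List (String × List (String × Int))) (imseq : List String) (imtypeseq : List String) (keypressseq : List Bool) : List (String × List (String × Int)) :=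
  let delta : PySem.Dict (String × String) Int :=
    (imseq.zip (imtypeseq.zip keypressseq)).foldl
      (fun delta t =>
        match typeTable.get? t.2.1 with
        | none => delta  -- Python: raise ValueError (outside Pre_)
        | some (partKey, pressKey, nopressKey) =>
          let delta :=
            match partKey with
            | some pk => delta.insert (t.1, pk) (delta.getD (t.1, pk) 0 + 1)
            | none => delta
          let key := if t.2.2 then pressKey else nopressKey
          delta.insert (t.1, key) (delta.getD (t.1, key) 0 + 1))
      PySem.Dict.empty
  delta.items.foldl (fun d q => pyInc d q.1.1 q.1.2 q.2) image_level_results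

-- ===== PRECONDITION & SPEC =====
-- The counter names A's cascade needs for a trial of this type/keypress (none = unknown
-- trial type, where A raises ValueError).
def pvNeeded (imtype : String) (keypress : Bool) : Option (List String) :=
  if imtype = "TARGET" then
    some ["n_participants_target", if keypress then "target_fa" else "target_cr"]
  else if imtype = "REPEAT" then
    some [if keypress then "target_hit" else "target_miss"]
  else if imtype = "FILLER" then
    some ["n_participants_filler", if keypress then "filler_fa" else "filler_cr"]
  else if imtype = "VIGILANCE" then
    some [if keypress then "filler_hit" else "filler_miss"]
  else none

-- Pre_ holds exactly where Python A returns: every trial has a known type (else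
-- ValueError), its image is a key of the outer dict and every counter name the trial
-- touches is a key of that image's inner dict (else KeyError). Key sets never change
-- during the loop, so this is a closed-form condition on the initial input.
def Pre_update_crt_image_level_results (image_level_results : List (String × List (String × Int))) (imseq : List String) (imtypeseq : List String) (keypressseq : List Bool) : Prop :=
  ∀ t ∈ imseq.zip (imtypeseq.zip keypressseq),
    (pvNeeded t.2.1 t.2.2).isSome = true ∧
    (image_level_results.lookup t.1).isSome = true ∧
    ∀ k ∈ (pvNeeded t.2.1 t.2.2).getD [],
      (((image_level_results.lookup t.1).getD []).lookup k).isSome = true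

instance (image_level_results : List (String × List (String × Int))) (imseq : List String) (imtypeseq : List String) (keypressseq : List Bool) : Decidable (Pre_update_crt_image_level_results image_level_results imseq imtypeseq keypressseq) := by unfold Pre_update_crt_image_level_results; infer_instance

def pvWitness_update_crt_image_level_results : (List (String × List (String × Int))) × List String × List String × List Bool :=
  ([("a.png", [("n_participants_target", 2), ("target_fa", 0), ("target_cr", 1), ("target_hit", 1), ("target_miss", 0)])],
   ["a.png", "a.png"], ["TARGET", "REPEAT"], [false, true])

def Spec_update_crt_image_level_results (image_level_results : List (String × List (String × Int))) (imseq : List String) (imtypeseq : List String) (keypressseq : List Bool) (out : List (String × List (String × Int))) : Prop := out = update_crt_image_level_results_alt image_level_results imseq imtypeseq keypressseq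
instance (image_level_results : List (String × List (String × Int))) (imseq : List String) (imtypeseq : List String) (keypressseq : List Bool) (out : List (String × List (String × Int))) : Decidable (Spec_update_crt_image_level_results image_level_results imseq imtypeseq keypressseq out) := by unfold Spec_update_crt_image_level_results; infer_instance

-- ===== CLAIM (what is proved, stated in full; the proofs are below) =====
def Claim_equal_update_crt_image_level_results : Prop := ∀ (image_level_results : List (String × List (String × Int))) (imseq : List String) (imtypeseq : List String) (keypressseq : List Bool), Dom_update_crt_image_level_results image_level_results imseq imtypeseq keypressseq → Pre_update_crt_image_level_results image_level_results imseq imtypeseq keypressseq → Spec_update_crt_image_level_results image_level_results imseq imtypeseq keypressseq (update_crt_image_level_results image_level_results imseq imtypeseq keypressseq)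

-- ===== LEMMAS AND PROOFS =====

-- The (image, counter) increments a single trial performs, in A's order.
def trialPairs (t : String × String × Bool) : List (String × String) :=
  ((pvNeeded t.2.1 t.2.2).getD []).map (fun k => (t.1, k))

theorem pyIncInner_comm (inner : List (String × Int)) (k k' : String) (c c' : Int) :
    pyIncInner (pyIncInner inner k c) k' c' = pyIncInner (pyIncInner inner k' c') k c := by
  induction inner with
  | nil => rfl
  | cons hd tl ih =>
    obtain ⟨a, v⟩ := hd
    by_cases h1 : a = k <;> by_cases h2 : a = k'
    · subst h1; subst h2; simp [pyIncInner]; ring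
    · subst h1; simp [pyIncInner, h2]
    · subst h2; simp [pyIncInner, h1]
    · simp [pyIncInner, h1, h2, ih]

theorem pyInc_comm (d : List (String × List (String × Int))) (i k i' k' : String) (c c' : Int) :
    pyInc (pyInc d i k c) i' k' c' = pyInc (pyInc d i' k' c') i k c := by
  induction d with
  | nil => rfl
  | cons hd tl ih =>
    obtain ⟨a, inner⟩ := hd
    by_cases h1 : a = i <;> by_cases h2 : a = i'
    · subst h1; subst h2; simp [pyInc, pyIncInner_comm]
    · subst h1; simp [pyInc, h2]
    · subst h2; simp [pyInc, h1]
    · simp [pyInc, h1, h2, ih]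

theorem pyIncInner_add (inner : List (String × Int)) (k : String) (a b : Int) :
    pyIncInner inner k (a + b) = pyIncInner (pyIncInner inner k a) k b := by
  induction inner with
  | nil => rfl
  | cons hd tl ih =>
    obtain ⟨x, v⟩ := hd
    by_cases h : x = k <;> simp [pyIncInner, h, ih] <;> ring

theorem pyInc_add (d : List (String × List (String × Int))) (i k : String) (a b : Int) :
    pyInc d i k (a + b) = pyInc (pyInc d i k a) i k b := by
  induction d with
  | nil => rfl
  | cons hd tl ih =>
    obtain ⟨x, inner⟩ := hd
    by_cases h : x = i <;> simp [pyInc, h, ih, pyIncInner_add]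

-- apply-phase step of B
def applyStep (d : List (String × List (String × Int))) (q : (String × String) × Int) :
    List (String × List (String × Int)) := pyInc d q.1.1 q.1.2 q.2

theorem foldl_applyStep_pyInc (l : List ((String × String) × Int))
    (d : List (String × List (String × Int))) (i k : String) (c : Int) :
    l.foldl applyStep (pyInc d i k c) = pyInc (l.foldl applyStep d) i k c := by
  induction l generalizing d with
  | nil => rfl
  | cons q rest ih =>
    rw [List.foldl_cons, List.foldl_cons,
      show applyStep (pyInc d i k c) q = pyInc (applyStep d q) i k c from pyInc_comm d i k q.1.1 q.1.2 c q.2, ih]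

-- replacing the unique entry at key p by value c+1 inside the apply fold = one extra bump
theorem foldl_applyStep_bump (items : List ((String × String) × Int)) (p : String × String)
    (c : Int) (d : List (String × List (String × Int)))
    (hnd : (items.map Prod.fst).Nodup) (hmem : (p, c) ∈ items) :
    (items.map (fun q => if q.1 == p then (p, c + 1) else q)).foldl applyStep d
      = pyInc (items.foldl applyStep d) p.1 p.2 1 := by
  induction items generalizing d with
  | nil => simp at hmem
  | cons q rest ih =>
    simp only [List.map_cons, List.nodup_cons, List.mem_map] at hnd
    by_cases h : q.1 = p
    · -- the head is THE entry at p; rest has no entry at p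
      have hq : q = (p, c) := by
        rcases List.mem_cons.mp hmem with h1 | h1
        · exact h1.symm
        · exact absurd ⟨(p, c), h1, h.symm⟩ hnd.1
      have hrest : rest.map (fun q => if q.1 == p then (p, c + 1) else q) = rest := by
        conv_rhs => rw [← List.map_id rest]
        apply List.map_congr_left
        intro a ha
        have hap : a.1 ≠ p := fun hap => hnd.1 ⟨a, ha, by rw [hap, ← h]⟩
        simp [hap]
      subst hq
      simp only [List.map_cons, List.foldl_cons, hrest, beq_self_eq_true, if_true]
      rw [show applyStep d (p, c + 1) = pyInc (applyStep d (p, c)) p.1 p.2 1 from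
        by simp [applyStep, pyInc_add], foldl_applyStep_pyInc]
    · have hmem' : (p, c) ∈ rest := by
        rcases List.mem_cons.mp hmem with h1 | h1
        · exact absurd (congrArg Prod.fst h1.symm) h
        · exact h1
      simp only [List.map_cons, List.foldl_cons]
      rw [show (if (q.1 == p) = true then (p, c + 1) else q) = q from by simp [h],
        ih (applyStep d q) hnd.2 hmem']

-- key lemma: one counter increment on the delta dict = one bump after the apply fold
theorem foldl_applyStep_counterStep (delta : PySem.Dict (String × String) Int)
    (p : String × String) (d : List (String × List (String × Int)))
    (hnd : delta.keys.Nodup) :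
    ((delta.insert p (delta.getD p 0 + 1)).items).foldl applyStep d
      = pyInc (delta.items.foldl applyStep d) p.1 p.2 1 := by
  by_cases hc : delta.contains p = true
  · obtain ⟨c, hget⟩ := Option.isSome_iff_exists.mp
      ((PySem.Dict.contains_eq_isSome_get? delta p) ▸ hc)
    have hval : delta.getD p 0 = c := PySem.Dict.getD_of_get?_eq_some delta 0 hget
    have hmem : (p, c) ∈ delta.items := PySem.Dict.mem_items_of_get?_eq_some delta hget
    rw [PySem.Dict.items_insert_of_contains delta _ hc, hval]
    exact foldl_applyStep_bump delta.items p c d (by simpa [PySem.Dict.keys] using hnd) hmem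
  · have hc' : delta.contains p = false := by simpa using hc
    rw [PySem.Dict.items_insert_of_not_contains delta _ hc',
      PySem.Dict.getD_of_not_contains delta _ hc', List.foldl_append]
    simp [applyStep]

-- main loop invariant: folding single increments = folding the aggregated counter
theorem main_invariant (L : List (String × String)) (delta : PySem.Dict (String × String) Int)
    (d : List (String × List (String × Int))) (hnd : delta.keys.Nodup) :
    L.foldl (fun d p => pyInc d p.1 p.2 1) (delta.items.foldl applyStep d)
      = ((L.foldl (fun dl p => dl.insert p (dl.getD p 0 + 1)) delta).items).foldl applyStep d := by
  induction L generalizing delta with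
  | nil => rfl
  | cons p rest ih =>
    simp only [List.foldl_cons]
    rw [← foldl_applyStep_counterStep delta p d hnd,
      ih _ (PySem.Dict.nodup_keys_insert _ _ _ hnd)]

-- A's loop body performs exactly the trial's increments, in order
theorem stepA_eq (d : List (String × List (String × Int))) (t : String × String × Bool) :
    (let im := t.1; let imtype := t.2.1; let keypress := t.2.2
     if imtype = "TARGET" then
       let d := pyInc d im "n_participants_target" 1
       if keypress then pyInc d im "target_fa" 1 else pyInc d im "target_cr" 1
     else if imtype = "REPEAT" then
       if keypress then pyInc d im "target_hit" 1 else pyInc d im "target_miss" 1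
     else if imtype = "FILLER" then
       let d := pyInc d im "n_participants_filler" 1
       if keypress then pyInc d im "filler_fa" 1 else pyInc d im "filler_cr" 1
     else if imtype = "VIGILANCE" then
       if keypress then pyInc d im "filler_hit" 1 else pyInc d im "filler_miss" 1
     else d)
      = (trialPairs t).foldl (fun d p => pyInc d p.1 p.2 1) d := by
  obtain ⟨im, ty, kp⟩ := t
  by_cases h1 : ty = "TARGET" <;> by_cases h2 : ty = "REPEAT" <;>
    by_cases h3 : ty = "FILLER" <;> by_cases h4 : ty = "VIGILANCE" <;>
      cases kp <;> simp_all [trialPairs, pvNeeded]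

-- B's delta-building body performs exactly the trial's counter increments, in order
theorem typeTable_items :
    typeTable = PySem.Dict.mk
      [("TARGET", (some "n_participants_target", "target_fa", "target_cr")),
       ("REPEAT", (none, "target_hit", "target_miss")),
       ("FILLER", (some "n_participants_filler", "filler_fa", "filler_cr")),
       ("VIGILANCE", (none, "filler_hit", "filler_miss"))] := rfl

-- B's delta-building body performs exactly the trial's counter increments, in order
theorem stepB_eq (delta : PySem.Dict (String × String) Int) (t : String × String × Bool) :
    (match typeTable.get? t.2.1 with
     | none => delta
     | some (partKey, pressKey, nopressKey) =>
       let delta :=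
         match partKey with
         | some pk => delta.insert (t.1, pk) (delta.getD (t.1, pk) 0 + 1)
         | none => delta
       let key := if t.2.2 then pressKey else nopressKey
       delta.insert (t.1, key) (delta.getD (t.1, key) 0 + 1))
      = (trialPairs t).foldl (fun dl p => dl.insert p (dl.getD p 0 + 1)) delta := by
  obtain ⟨im, ty, kp⟩ := t
  by_cases h1 : ty = "TARGET"
  · subst h1
    rw [show typeTable.get? "TARGET"
        = some (some "n_participants_target", "target_fa", "target_cr") from rfl]
    cases kp <;> simp [trialPairs, pvNeeded]
  · by_cases h2 : ty = "REPEAT"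
    · subst h2
      rw [show typeTable.get? "REPEAT" = some (none, "target_hit", "target_miss") from rfl]
      cases kp <;> simp [trialPairs, pvNeeded]
    · by_cases h3 : ty = "FILLER"
      · subst h3
        rw [show typeTable.get? "FILLER"
            = some (some "n_participants_filler", "filler_fa", "filler_cr") from rfl]
        cases kp <;> simp [trialPairs, pvNeeded]
      · by_cases h4 : ty = "VIGILANCE"
        · subst h4
          rw [show typeTable.get? "VIGILANCE"
              = some (none, "filler_hit", "filler_miss") from rfl]
          cases kp <;> simp [trialPairs, pvNeeded]
        · have hnone : typeTable.get? ty = none := by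
            rw [typeTable_items]
            simp [beq_iff_eq, Ne.symm h1, Ne.symm h2, Ne.symm h3, Ne.symm h4, PySem.Dict.get?]
          rw [hnone]
          simp [trialPairs, pvNeeded, h1, h2, h3, h4]

-- fold over flattened increments = fold of per-trial folds
theorem foldl_flatMap_inc (L : List (String × String × Bool))
    (d : List (String × List (String × Int))) :
    (L.flatMap trialPairs).foldl (fun d p => pyInc d p.1 p.2 1) d
      = L.foldl (fun d t => (trialPairs t).foldl (fun d p => pyInc d p.1 p.2 1) d) d := by
  induction L generalizing d with
  | nil => rfl
  | cons t rest ih => simp [List.flatMap_cons, List.foldl_append, ih]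

theorem foldl_flatMap_counter (L : List (String × String × Bool))
    (delta : PySem.Dict (String × String) Int) :
    (L.flatMap trialPairs).foldl (fun dl p => dl.insert p (dl.getD p 0 + 1)) delta
      = L.foldl (fun dl t => (trialPairs t).foldl (fun dl p => dl.insert p (dl.getD p 0 + 1)) dl) delta := by
  induction L generalizing delta with
  | nil => rfl
  | cons t rest ih => simp [List.flatMap_cons, List.foldl_append, ih]

-- ===== VERDICT (by name: the statement is the Claim_ definition above) =====
theorem update_crt_image_level_results_spec : Claim_equal_update_crt_image_level_results := by
  intro d imseq imtypeseq keypressseq _ _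
  unfold Spec_update_crt_image_level_results
  unfold update_crt_image_level_results update_crt_image_level_results_alt
  simp only [stepA_eq, stepB_eq, ← foldl_flatMap_inc, ← foldl_flatMap_counter]
  have h := main_invariant ((imseq.zip (imtypeseq.zip keypressseq)).flatMap trialPairs)
    PySem.Dict.empty d PySem.Dict.nodup_keys_empty
  simpa [PySem.Dict.empty] using h
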